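-- pv_equiv track=rewrite | github.com/jeongy616/Algorithm-Study | programmers/functionDevelopment.py | solution
-- ===== SOURCE A (Python) =====
-- import math
--
-- def solution(progresses, speeds):
--     answer = []
--     days = [0] * len(progresses)
--     cnt = 1
--
--     for i in range(len(progresses)):
--         days[i] = math.ceil((100 - progresses[i]) / speeds[i])
--
--     day = days[0]
--     for i in range(1, len(days)):
--         if day < days[i]:
--             day = days[i]
--             answer.append(cnt)
--             cnt = 1
--         else: cnt += 1
--
--     answer.append(cnt)
--     return answer
-- ===== SOURCE B (Python) =====
-- import math
--
-- def solution(progresses, speeds):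
--     days = [math.ceil((100 - p) / s) for p, s in zip(progresses, speeds)]
--     # a new deployment group starts exactly at the strict prefix-record positions of days
--     cuts = [i for i in range(len(days)) if i == 0 or days[i] > max(days[:i])]
--     cuts.append(len(days))
--     return [b - a for a, b in zip(cuts, cuts[1:])]
-- ===== Notes on version B (the rewrite author's own statement) =====
-- stated objective: alternative
-- what changed: B carries no loop state at all: it declaratively computes the group-start indices as the strict prefix-record positions of days (each checked with a fresh nested max(days[:i]) scan) and returns the differences of consecutive cut indices, instead of A's single pass with a running max and an incrementing counter.
-- outside the precondition, e.g. on solution([], []): A raises IndexError, B returns []; on solution([50], [0]): A raises ZeroDivisionError, B raises ZeroDivisionError; on solution([50, 50], [1]): A raises IndexError, B returns [1]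
import Mathlib
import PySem

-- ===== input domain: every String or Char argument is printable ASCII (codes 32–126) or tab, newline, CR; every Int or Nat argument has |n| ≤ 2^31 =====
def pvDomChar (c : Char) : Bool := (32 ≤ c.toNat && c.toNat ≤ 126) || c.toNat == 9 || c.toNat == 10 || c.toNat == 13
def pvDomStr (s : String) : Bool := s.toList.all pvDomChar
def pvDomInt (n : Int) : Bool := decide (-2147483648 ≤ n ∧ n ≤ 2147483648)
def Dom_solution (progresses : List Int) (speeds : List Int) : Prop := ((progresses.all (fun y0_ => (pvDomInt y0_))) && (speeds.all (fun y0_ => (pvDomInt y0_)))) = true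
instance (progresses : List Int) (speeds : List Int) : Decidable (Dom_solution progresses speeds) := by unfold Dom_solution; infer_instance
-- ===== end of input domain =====

-- B is stateless: it finds the group-start indices as strict prefix-record positions of
-- days (nested max(days[:i]) scan) and returns differences of consecutive cuts; objective:
-- alternative decomposition (B is O(n^2) vs A's O(n) single pass).

-- ===== PORT A =====
-- math.ceil((100-p)/s) ported as exact ceiling division -((-(100-p)) // s): exact here because
-- for |values| ≤ 2^31 the float quotient is never rounded across an integer.
def pvCeilDiv (a b : Int) : Int := -(PySem.Int.floordiv (-a) b)

-- the second for-loop of A: index recursion over i in range(1, len(days)) with state (day, cnt, answer)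
def pvLoopA (days : List Int) (i : Nat) (day : Int) (cnt : Int) (answer : List Int) : List Int :=
  if h : i < days.length then
    if day < days[i] then pvLoopA days (i+1) (days[i]) 1 (answer ++ [cnt])
    else pvLoopA days (i+1) day (cnt+1) answer
  else answer ++ [cnt]
termination_by days.length - i

def solution (progresses : List Int) (speeds : List Int) : List Int :=
  -- days[i] = ceil((100 - progresses[i]) / speeds[i]) for i in range(len(progresses))
  let days := (List.range progresses.length).map (fun (i : Nat) =>
    pvCeilDiv (100 - (PySem.List.pyGet? progresses (i : Int)).getD 0)
      ((PySem.List.pyGet? speeds (i : Int)).getD 1))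
  let day := (PySem.List.pyGet? days 0).getD 0
  pvLoopA days 1 day 1 []

-- ===== PORT B =====
-- the filter of B's list comprehension: i == 0 or days[i] > max(days[:i])
-- (the 'none' branch of max is unreachable: the 'or' short-circuits it away for i == 0)
def pvCut (days : List Int) (i : Int) : Bool :=
  i == 0 ||
    (match PySem.List.max? (PySem.List.slice days none (some i)) (fun y => y) with
     | some m => decide (m < (PySem.List.pyGet? days i).getD 0)
     | none => false)

-- [b - a for a, b in zip(cuts, cuts[1:])]
def pvDiffs (l : List Int) : List Int := (l.zip l.tail).map (fun ab => ab.2 - ab.1)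

def solution_alt (progresses : List Int) (speeds : List Int) : List Int :=
  let days := (progresses.zip speeds).map (fun ps => pvCeilDiv (100 - ps.1) ps.2)
  let cuts := (PySem.List.pyRange 0 (days.length : Int) 1).filter (pvCut days) ++ [(days.length : Int)]
  pvDiffs cuts

-- ===== PRECONDITION & SPEC =====
-- Pre: A raises IndexError on empty progresses or when speeds is shorter than progresses,
-- and ZeroDivisionError when a used speed is 0; exactly those inputs are excluded.
def Pre_solution (progresses : List Int) (speeds : List Int) : Prop :=
  progresses ≠ [] ∧ progresses.length ≤ speeds.length ∧
    ∀ x ∈ speeds.take progresses.length, x ≠ 0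
instance (progresses : List Int) (speeds : List Int) : Decidable (Pre_solution progresses speeds) := by
  unfold Pre_solution; infer_instance
def pvWitness_solution : List Int × List Int := ([30, 95, 90], [5, 10, 1])

def Spec_solution (progresses : List Int) (speeds : List Int) (out : List Int) : Prop := out = solution_alt progresses speeds
instance (progresses : List Int) (speeds : List Int) (out : List Int) : Decidable (Spec_solution progresses speeds out) := by unfold Spec_solution; infer_instance

-- ===== CLAIM (what is proved, stated in full; the proofs are below) =====
def Claim_equal_solution : Prop := ∀ (progresses : List Int) (speeds : List Int), Dom_solution progresses speeds → Pre_solution progresses speeds → Spec_solution progresses speeds (solution progresses speeds)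

-- ===== LEMMAS AND PROOFS =====

theorem pvLoopA_boundary (days : List Int) (i : Nat) (day cnt : Int) (answer : List Int)
    (h : i < days.length) (hlt : day < days[i]) :
    pvLoopA days i day cnt answer = pvLoopA days (i+1) (days[i]) 1 (answer ++ [cnt]) := by
  conv_lhs => rw [pvLoopA]
  simp [dif_pos h, if_pos hlt]

theorem pvLoopA_cont (days : List Int) (i : Nat) (day cnt : Int) (answer : List Int)
    (h : i < days.length) (hlt : ¬ day < days[i]) :
    pvLoopA days i day cnt answer = pvLoopA days (i+1) day (cnt+1) answer := by
  conv_lhs => rw [pvLoopA]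
  simp [dif_pos h, if_neg hlt]

theorem pvLoopA_end (days : List Int) (i : Nat) (day cnt : Int) (answer : List Int)
    (h : ¬ i < days.length) : pvLoopA days i day cnt answer = answer ++ [cnt] := by
  rw [pvLoopA]; simp [dif_neg h]

-- the accumulator of pvLoopA only ever grows by appending on the right
theorem pvLoopA_acc (days : List Int) (i : Nat) (day cnt : Int) (answer : List Int) :
    pvLoopA days i day cnt answer = answer ++ pvLoopA days i day cnt [] := by
  by_cases h : i < days.length
  · by_cases hlt : day < days[i]
    · rw [pvLoopA_boundary days i day cnt answer h hlt,
        pvLoopA_boundary days i day cnt [] h hlt,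
        pvLoopA_acc days (i+1) (days[i]) 1 (answer ++ [cnt]),
        pvLoopA_acc days (i+1) (days[i]) 1 ([] ++ [cnt])]
      simp
    · rw [pvLoopA_cont days i day cnt answer h hlt, pvLoopA_cont days i day cnt [] h hlt,
        pvLoopA_acc days (i+1) day (cnt+1) answer]
  · rw [pvLoopA_end days i day cnt answer h, pvLoopA_end days i day cnt [] h]
    simp
termination_by days.length - i
decreasing_by all_goals omega

theorem pvDiffs_cons_cons (a b : Int) (t : List Int) :
    pvDiffs (a :: b :: t) = (b - a) :: pvDiffs (b :: t) := by
  simp [pvDiffs]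

-- for 1 ≤ i < len and day = max(days[:i]), the filter predicate is 'day < days[i]'
theorem pvCut_eq (days : List Int) (i : Nat) (h1 : 1 ≤ i) (h : i < days.length) (day : Int)
    (hmem : day ∈ days.take i) (hmax : ∀ x ∈ days.take i, x ≤ day) :
    pvCut days (i : Int) = decide (day < days[i]) := by
  have hz : ((i : Int) == 0) = false := by simp; omega
  have hsl : PySem.List.slice days none (some (i : Int)) = days.take i :=
    PySem.List.slice_to_natCast days i
  have hne : days.take i ≠ [] := by
    intro hnil; rw [hnil] at hmem; exact absurd hmem (List.not_mem_nil)
  obtain ⟨m, hm⟩ : ∃ m, PySem.List.max? (days.take i) (fun y => y) = some m := by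
    rcases ho : PySem.List.max? (days.take i) (fun y => y) with _ | m
    · exact absurd ((PySem.List.max?_eq_none_iff _ _).1 ho) hne
    · exact ⟨m, rfl⟩
  have hmmem := PySem.List.max?_mem hm
  have hmmax := PySem.List.max?_isMax hm
  have hmd : m = day := le_antisymm (hmax m hmmem) (hmmax day hmem)
  have hg : (PySem.List.pyGet? days (i : Int)).getD 0 = days[i] := by
    simp [PySem.List.pyGet?_natCast, List.getElem?_eq_getElem h]
  rw [pvCut, hz, hsl, hm, hmd, hg]
  simp

-- invariant of A's loop: with day the max of days[:i], the remaining loop produces the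
-- consecutive differences of (i - cnt) :: remaining record positions :: [len]
theorem pvLoopA_eq_cuts (days : List Int) (i : Nat) (day cnt : Int)
    (h1 : 1 ≤ i) (h2 : i ≤ days.length)
    (hmem : day ∈ days.take i) (hmax : ∀ x ∈ days.take i, x ≤ day) :
    pvLoopA days i day cnt [] =
      pvDiffs (((i : Int) - cnt) ::
        ((PySem.List.pyRange (i : Int) (days.length : Int) 1).filter (pvCut days) ++
          [(days.length : Int)])) := by
  by_cases h : i < days.length
  · have hcons : PySem.List.pyRange (i : Int) (days.length : Int) 1 =
        (i : Int) :: PySem.List.pyRange ((i + 1 : Nat) : Int) (days.length : Int) 1 := by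
      rw [PySem.List.pyRange_one_cons (by exact_mod_cast h)]
      norm_num
    have hcut := pvCut_eq days i h1 h day hmem hmax
    have htake : days.take (i+1) = days.take i ++ [days[i]] := by
      rw [List.take_succ, List.getElem?_eq_getElem h]; rfl
    by_cases hlt : day < days[i]
    · -- boundary: record position i, group closes
      have hmem' : days[i] ∈ days.take (i+1) := by
        rw [htake]; exact List.mem_append_right _ (List.mem_singleton_self _)
      have hmax' : ∀ x ∈ days.take (i+1), x ≤ days[i] := by
        intro x hx
        rw [htake] at hx
        rcases List.mem_append.1 hx with hx | hx
        · exact le_of_lt (lt_of_le_of_lt (hmax x hx) hlt)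
        · simp at hx; omega
      rw [pvLoopA_boundary days i day cnt [] h hlt, pvLoopA_acc,
        pvLoopA_eq_cuts days (i+1) (days[i]) 1 (by omega) (by omega) hmem' hmax',
        hcons]
      have hfil : pvCut days (i : Int) = true := by rw [hcut]; simp [hlt]
      rw [List.filter_cons, hfil]
      simp only [if_true, List.cons_append, pvDiffs_cons_cons, List.nil_append]
      rw [show ((i + 1 : Nat) : Int) - 1 = (i : Int) by push_cast; ring,
        show (i : Int) - ((i : Int) - cnt) = cnt by ring]
    · -- continue: not a record, same group
      have hmem' : day ∈ days.take (i+1) := by rw [htake]; exact List.mem_append_left _ hmem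
      have hmax' : ∀ x ∈ days.take (i+1), x ≤ day := by
        intro x hx
        rw [htake] at hx
        rcases List.mem_append.1 hx with hx | hx
        · exact hmax x hx
        · simp at hx; omega
      rw [pvLoopA_cont days i day cnt [] h hlt,
        pvLoopA_eq_cuts days (i+1) day (cnt+1) (by omega) (by omega) hmem' hmax',
        hcons]
      have hfil : pvCut days (i : Int) = false := by rw [hcut]; simp [hlt]
      rw [List.filter_cons, hfil]
      simp only [Bool.false_eq_true, if_false]
      congr 2
      push_cast
      omega
  · -- i = len: loop ends, last group of cnt
    have hie : i = days.length := by omega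
    rw [pvLoopA_end days i day cnt [] h,
      PySem.List.pyRange_one_eq_nil (by exact_mod_cast hie.ge)]
    simp [pvDiffs]
    omega
termination_by days.length - i
decreasing_by all_goals omega

-- under Pre_, A's index-built days list equals B's zip-built days list
theorem pv_days_eq (progresses speeds : List Int)
    (hlen : progresses.length ≤ speeds.length) :
    (List.range progresses.length).map (fun (i : Nat) =>
        pvCeilDiv (100 - (PySem.List.pyGet? progresses (i : Int)).getD 0)
          ((PySem.List.pyGet? speeds (i : Int)).getD 1)) =
      (progresses.zip speeds).map (fun ps => pvCeilDiv (100 - ps.1) ps.2) := by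
  apply List.ext_getElem
  · simp; omega
  · intro k h1 h2
    have hk : k < progresses.length := by simpa using h1
    have hks : k < speeds.length := by omega
    simp only [List.getElem_map, List.getElem_range, List.getElem_zip,
      PySem.List.pyGet?_natCast, List.getElem?_eq_getElem, hk, hks, Option.getD_some]

theorem pv_main (progresses speeds : List Int) (hp : progresses ≠ [])
    (hlen : progresses.length ≤ speeds.length) :
    solution progresses speeds = solution_alt progresses speeds := by
  simp only [solution, solution_alt]
  rw [pv_days_eq progresses speeds hlen]
  set days := (progresses.zip speeds).map (fun ps => pvCeilDiv (100 - ps.1) ps.2) with hdays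
  have hp' := List.length_pos_of_ne_nil hp
  have hd : 0 < days.length := by simp [hdays]; omega
  have h0 : (PySem.List.pyGet? days 0).getD 0 = days[0] := by
    have : ((0 : Nat) : Int) = (0 : Int) := rfl
    rw [← this, PySem.List.pyGet?_natCast]
    simp [hd]
  have htake1 : days.take 1 = [days[0]] := by
    rw [List.take_succ, List.take_zero, List.getElem?_eq_getElem hd]; rfl
  have hmem : days[0] ∈ days.take 1 := by rw [htake1]; simp
  have hmax : ∀ x ∈ days.take 1, x ≤ days[0] := by
    intro x hx; rw [htake1] at hx; simp at hx; omega
  rw [h0, pvLoopA_eq_cuts days 1 (days[0]) 1 le_rfl hd hmem hmax]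
  have hcons : PySem.List.pyRange 0 (days.length : Int) 1 =
      (0 : Int) :: PySem.List.pyRange ((1 : Nat) : Int) (days.length : Int) 1 := by
    rw [PySem.List.pyRange_one_cons (by exact_mod_cast hd)]
    norm_num
  have hcut0 : pvCut days (0 : Int) = true := by simp [pvCut]
  rw [hcons, List.filter_cons, hcut0]
  norm_num

-- ===== VERDICT (by name: the statement is the Claim_ definition above) =====
theorem solution_spec : Claim_equal_solution := by
  intro progresses speeds _hdom hpre
  unfold Spec_solution
  exact pv_main progresses speeds hpre.1 hpre.2.1
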